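-- pv_equiv track=rewrite | github.com/yabincui/topcoder | DequeSort.py | minDeques
-- ===== SOURCE A (Python) =====
-- def minDeques(data):
-- 	sortedData = sorted(data)
-- 	numToIndex = {}
-- 	for i in range(len(sortedData)):
-- 		numToIndex[sortedData[i]] = i
-- 	deques = []
-- 	for x in data:
-- 		index = numToIndex[x]
-- 		pushed = False
-- 		for deque in deques:
-- 			if index == deque[0] - 1:
-- 				deque[0] -= 1
-- 				pushed = True
-- 				break
-- 			if index == deque[1] + 1:
-- 				deque[1] += 1
-- 				pushed = True
-- 				break
-- 		if not pushed:
-- 			deques.append([index, index])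
-- 	return len(deques)
-- ===== SOURCE B (Python) =====
-- def minDeques(data):
--     rank = {v: i for i, v in enumerate(sorted(data))}
--     lo = []                 # current left endpoint of deque j
--     hi = []                 # current right endpoint of deque j
--     by_lo = {}              # endpoint value -> ids of deques whose lo is that value
--     by_hi = {}              # endpoint value -> ids of deques whose hi is that value
--     for x in data:
--         i = rank[x]
--         cands = by_lo.get(i + 1, []) + by_hi.get(i - 1, [])
--         if cands:
--             j = min(cands)  # earliest-created matching deque
--             if lo[j] == i + 1:
--                 by_lo[i + 1].remove(j)
--                 lo[j] = i
--                 by_lo.setdefault(i, []).append(j)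
--             else:
--                 by_hi[i - 1].remove(j)
--                 hi[j] = i
--                 by_hi.setdefault(i, []).append(j)
--         else:
--             j = len(lo)
--             lo.append(i)
--             hi.append(i)
--             by_lo.setdefault(i, []).append(j)
--             by_hi.setdefault(i, []).append(j)
--     return len(lo)
-- ===== Notes on version B (the rewrite author's own statement) =====
-- stated objective: faster
-- what changed: Replaces A's inner linear scan over all deques by two dicts indexing deques by their current endpoint values (keeping deque ids so the earliest-created match is still chosen via min), so each element is placed with O(1) expected dict work instead of an O(n) scan.
import Mathlib
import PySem

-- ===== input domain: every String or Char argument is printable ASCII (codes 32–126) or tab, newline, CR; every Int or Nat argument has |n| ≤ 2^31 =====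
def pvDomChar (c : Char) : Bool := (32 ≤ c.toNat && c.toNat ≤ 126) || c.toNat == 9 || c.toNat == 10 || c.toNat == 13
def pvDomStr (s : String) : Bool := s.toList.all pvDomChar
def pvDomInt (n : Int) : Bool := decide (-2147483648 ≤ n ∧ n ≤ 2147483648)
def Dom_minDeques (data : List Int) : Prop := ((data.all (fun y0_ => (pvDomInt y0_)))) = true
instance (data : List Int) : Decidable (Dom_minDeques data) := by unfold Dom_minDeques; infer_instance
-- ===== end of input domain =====

-- B replaces A's linear scan over all deques per element by two dicts indexing deques by
-- their current endpoint values (earliest-created match picked via min over stored ids).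

-- ===== PORT A =====
-- A's inner 'for deque in deques: … break' loop: push index i into the first matching
-- deque (lo-test before hi-test, deques in creation order, as in A); none = not pushed.
def pvTryPush (i : Int) : List (Int × Int) → Option (List (Int × Int))
  | [] => none
  | d :: t =>
    if i = d.1 - 1 then some ((d.1 - 1, d.2) :: t)
    else if i = d.2 + 1 then some ((d.1, d.2 + 1) :: t)
    else (pvTryPush i t).map (d :: ·)


-- transliteration of A; sortedData[i] via pyGetD (i ∈ range(len) is always in range) and
-- numToIndex[x] via getD (every x ∈ data is a key of numToIndex, so no KeyError arises)
def minDeques (data : List Int) : Int :=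
  let sortedData := PySem.List.sorted data (fun x => x) false
  let numToIndex := (PySem.List.pyRange 0 (sortedData.length : Int) 1).foldl
      (fun m i => m.insert (PySem.List.pyGetD sortedData i 0) i) PySem.Dict.empty
  let deques := data.foldl (fun ds x =>
      let index := numToIndex.getD x 0
      match pvTryPush index ds with
      | some ds' => ds'
      | none => ds ++ [(index, index)]) []
  (deques.length : Int)


-- ===== PORT B =====
-- xs.remove(v); exact when v ∈ xs, which every call site here guarantees
def pvRemoveD (xs : List Int) (v : Int) : List Int := (PySem.List.remove? xs v).getD xs


-- one iteration of B's loop on state (lo, hi, by_lo, by_hi); lo[j]/lo[j]=i via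
-- pyGetD/pySetD (j is a stored deque id, always in range)
def pvStepB (i : Int)
    (st : List Int × List Int × PySem.Dict Int (List Int) × PySem.Dict Int (List Int)) :
    List Int × List Int × PySem.Dict Int (List Int) × PySem.Dict Int (List Int) :=
  let lo := st.1; let hi := st.2.1; let bl := st.2.2.1; let bh := st.2.2.2
  let cands := bl.getD (i + 1) [] ++ bh.getD (i - 1) []
  match PySem.List.min? cands (fun x => x) with
  | some j =>
    if PySem.List.pyGetD lo j 0 = i + 1 then
      (PySem.List.pySetD lo j i, hi,
       (bl.insert (i + 1) (pvRemoveD (bl.getD (i + 1) []) j)).modify i [] (· ++ [j]), bh)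
    else
      (lo, PySem.List.pySetD hi j i, bl,
       (bh.insert (i - 1) (pvRemoveD (bh.getD (i - 1) []) j)).modify i [] (· ++ [j]))
  | none =>
    let j : Int := (lo.length : Int)
    (lo ++ [i], hi ++ [i], bl.modify i [] (· ++ [j]), bh.modify i [] (· ++ [j]))

def minDeques_alt (data : List Int) : Int :=
  let rank := (PySem.List.enumerate (PySem.List.sorted data (fun x => x) false) 0).foldl
      (fun m p => m.insert p.2 p.1) PySem.Dict.empty
  let st := data.foldl (fun st x => pvStepB (rank.getD x 0) st)
      ([], [], PySem.Dict.empty, PySem.Dict.empty)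
  (st.1.length : Int)


-- ===== PRECONDITION & SPEC =====
def Spec_minDeques (data : List Int) (out : Int) : Prop := out = minDeques_alt data
instance (data : List Int) (out : Int) : Decidable (Spec_minDeques data out) := by unfold Spec_minDeques; infer_instance

-- ===== CLAIM (what is proved, stated in full; the proofs are below) =====
def Claim_equal_minDeques : Prop := ∀ (data : List Int), Dom_minDeques data → Spec_minDeques data (minDeques data)

-- ===== LEMMAS AND PROOFS =====

-- deque d can absorb index i (A's two tests, in either position)
def pvMatch (i : Int) (d : Int × Int) : Prop := i = d.1 - 1 ∨ i = d.2 + 1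


-- A's loop body as a function (the match inside minDeques)
def pvStepA (i : Int) (ds : List (Int × Int)) : List (Int × Int) :=
  match pvTryPush i ds with
  | some ds' => ds'
  | none => ds ++ [(i, i)]


-- bucket dict b indexes exactly the positions of ds by their f-projection, without duplicates
def pvBucketInv (f : Int × Int → Int) (b : PySem.Dict Int (List Int)) (ds : List (Int × Int)) : Prop :=
  ∀ v : Int, (b.getD v []).Nodup ∧
    ∀ j : Int, j ∈ b.getD v [] ↔ 0 ≤ j ∧ (ds.map f)[j.toNat]? = some v


-- invariant tying A's deque list to B's state
def pvInv (ds : List (Int × Int))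
    (st : List Int × List Int × PySem.Dict Int (List Int) × PySem.Dict Int (List Int)) : Prop :=
  st.1 = ds.map Prod.fst ∧ st.2.1 = ds.map Prod.snd ∧
  pvBucketInv Prod.fst st.2.2.1 ds ∧ pvBucketInv Prod.snd st.2.2.2 ds


lemma pvTryPush_cons_none (i : Int) (d : Int × Int) (t : List (Int × Int)) :
    pvTryPush i (d :: t) = none ↔ ¬ pvMatch i d ∧ pvTryPush i t = none := by
  simp only [pvTryPush]
  split_ifs with h1 h2
  · simp [pvMatch, h1]
  · simp [pvMatch, h2]
  · simp [pvMatch, h1, h2]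


lemma pvTryPush_none_iff (i : Int) (ds : List (Int × Int)) :
    pvTryPush i ds = none ↔ ∀ d ∈ ds, ¬ pvMatch i d := by
  induction ds with
  | nil => simp [pvTryPush]
  | cons d t ih => rw [pvTryPush_cons_none]; simp [ih]


lemma pvTryPush_some (i : Int) (ds : List (Int × Int)) (k : Nat) (hk : k < ds.length)
    (hm : pvMatch i ds[k]) (hleast : ∀ l (hl : l < k), ¬ pvMatch i (ds[l]'(by omega))) :
    pvTryPush i ds = some (ds.set k
      (if i = ds[k].1 - 1 then (ds[k].1 - 1, ds[k].2) else (ds[k].1, ds[k].2 + 1))) := by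
  induction ds generalizing k with
  | nil => simp at hk
  | cons d t ih =>
    cases k with
    | zero =>
      simp only [List.getElem_cons_zero] at hm ⊢
      by_cases h1 : i = d.1 - 1
      · simp [pvTryPush, h1]
      · have h2 : i = d.2 + 1 := hm.resolve_left h1
        have : pvTryPush i (d :: t) = some ((d.1, d.2 + 1) :: t) := by
          simp only [pvTryPush]; rw [if_neg h1, if_pos h2]
        rw [this, List.set_cons_zero, if_neg h1]
    | succ k' =>
      have h0 : ¬ pvMatch i d := by
        have := hleast 0 (Nat.succ_pos _)
        simpa using this
      have h1 : ¬ i = d.1 - 1 := fun h => h0 (Or.inl h)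
      have h2 : ¬ i = d.2 + 1 := fun h => h0 (Or.inr h)
      have hk' : k' < t.length := by simpa using hk
      have := ih k' hk' (by simpa using hm)
        (fun l hl => by simpa using hleast (l+1) (by omega))
      simp [pvTryPush, h1, h2, this, List.set_cons_succ]


lemma pvRemoveD_of_mem {xs : List Int} {v : Int} (h : v ∈ xs) : pvRemoveD xs v = xs.erase v := by
  simp [pvRemoveD, PySem.List.remove?_eq_some_erase _ _ h]


lemma pvLookup_lt {ds : List (Int × Int)} {f : Int × Int → Int} {m : Nat} {v : Int}
    (h : (ds.map f)[m]? = some v) : m < ds.length := by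
  obtain ⟨hlt, -⟩ := List.getElem?_eq_some_iff.mp h
  simpa using hlt


lemma pvLookup_self {ds : List (Int × Int)} {f : Int × Int → Int} {k : Nat}
    (hk : k < ds.length) : (ds.map f)[k]? = some (f ds[k]) := by
  simp [hk]


lemma pvLookup_val {ds : List (Int × Int)} {f : Int × Int → Int} {k : Nat} {v : Int}
    (hk : k < ds.length) (h : (ds.map f)[k]? = some v) : f ds[k] = v := by
  rw [pvLookup_self hk] at h
  exact Option.some_inj.mp h


lemma pvLookup_set {ds : List (Int × Int)} (f : Int × Int → Int) {k : Nat}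
    (hk : k < ds.length) (d' : Int × Int) (m : Nat) (v : Int) :
    ((ds.set k d').map f)[m]? = some v ↔
      (m = k ∧ f d' = v) ∨ (m ≠ k ∧ (ds.map f)[m]? = some v) := by
  rw [List.map_set]
  by_cases hjk : m = k
  · subst hjk
    rw [List.getElem?_set_self (by simpa using hk)]
    simp
  · rw [List.getElem?_set_ne (fun h => hjk h.symm)]
    simp [hjk]


lemma pvLookup_append {ds : List (Int × Int)} (f : Int × Int → Int) (d' : Int × Int)
    (m : Nat) (v : Int) :
    ((ds ++ [d']).map f)[m]? = some v ↔
      (m = ds.length ∧ f d' = v) ∨ (m < ds.length ∧ (ds.map f)[m]? = some v) := by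
  rw [List.map_append]
  rcases Nat.lt_trichotomy m ds.length with hm | hm | hm
  · rw [List.getElem?_append_left (by simpa using hm)]
    simp [hm, Nat.ne_of_lt hm]
  · subst hm
    rw [List.getElem?_append_right (by simp)]
    simp
  · rw [List.getElem?_eq_none (by simpa using hm)]
    simp
    omega

-- untouched bucket survives a set that keeps its projection

lemma pvBucketInv_set_same (f : Int × Int → Int) (b : PySem.Dict Int (List Int))
    (ds : List (Int × Int)) (hb : pvBucketInv f b ds) (k : Nat) (hk : k < ds.length)
    (d' : Int × Int) (hsame : f d' = f ds[k]) : pvBucketInv f b (ds.set k d') := by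
  have hk' : k < (ds.map f).length := by simpa using hk
  have : (ds.set k d').map f = ds.map f := by
    rw [List.map_set, hsame, show f ds[k] = (ds.map f)[k]'hk' from by simp,
      List.set_getElem_self]
  rw [pvBucketInv, this]; exact hb

-- the touched bucket pair: id k moves from bucket (f ds[k]) to bucket (f d')

lemma pvBucketInv_set_move (f : Int × Int → Int) (b : PySem.Dict Int (List Int))
    (ds : List (Int × Int)) (hb : pvBucketInv f b ds) (k : Nat) (hk : k < ds.length)
    (d' : Int × Int) (hne : f ds[k] ≠ f d') :
    pvBucketInv f ((b.insert (f ds[k]) (pvRemoveD (b.getD (f ds[k]) []) (k : Int))).modify (f d') []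
      (· ++ [(k : Int)])) (ds.set k d') := by
  have hkmem : (k : Int) ∈ b.getD (f ds[k]) [] := by
    rw [(hb (f ds[k])).2]
    exact ⟨by positivity, by simpa using pvLookup_self hk⟩
  have hrm : pvRemoveD (b.getD (f ds[k]) []) (k : Int) = (b.getD (f ds[k]) []).erase (k : Int) :=
    pvRemoveD_of_mem hkmem
  intro v
  rw [PySem.Dict.getD_modify]
  by_cases hvw : v = f d'
  · subst hvw
    rw [if_pos rfl, PySem.Dict.getD_insert, if_neg (Ne.symm hne)]
    constructor
    · refine List.Nodup.append (hb (f d')).1 (by simp) ?_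
      intro j hj hj'
      simp only [List.mem_singleton] at hj'
      subst hj'
      have := ((hb (f d')).2 _).1 hj
      have hv := pvLookup_val hk (by simpa using this.2)
      exact hne hv
    · intro j
      rw [List.mem_append, (hb (f d')).2, List.mem_singleton]
      constructor
      · rintro (⟨hj0, hj⟩ | rfl)
        · have hjk : j.toNat ≠ k := by
            intro h; rw [h] at hj; exact hne (pvLookup_val hk hj)
          exact ⟨hj0, (pvLookup_set f hk d' _ _).mpr (Or.inr ⟨hjk, hj⟩)⟩
        · exact ⟨by positivity, (pvLookup_set f hk d' _ _).mpr (Or.inl ⟨by simp, rfl⟩)⟩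
      · rintro ⟨hj0, hj⟩
        rcases (pvLookup_set f hk d' _ _).mp hj with ⟨hjk, -⟩ | ⟨hjk, hj'⟩
        · right; omega
        · exact Or.inl ⟨hj0, hj'⟩
  · rw [if_neg hvw, PySem.Dict.getD_insert]
    by_cases hvu : v = f ds[k]
    · subst hvu
      rw [if_pos rfl, hrm]
      refine ⟨List.Nodup.erase _ (hb _).1, ?_⟩
      intro j
      rw [List.Nodup.mem_erase_iff (hb _).1, (hb _).2]
      constructor
      · rintro ⟨hjk, hj0, hj⟩
        have hjk' : j.toNat ≠ k := by intro h; apply hjk; omega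
        exact ⟨hj0, (pvLookup_set f hk d' _ _).mpr (Or.inr ⟨hjk', hj⟩)⟩
      · rintro ⟨hj0, hj⟩
        rcases (pvLookup_set f hk d' _ _).mp hj with ⟨hjk, hv⟩ | ⟨hjk, hj'⟩
        · exact absurd hv.symm hvw
        · exact ⟨by omega, hj0, hj'⟩
    · rw [if_neg hvu]
      refine ⟨(hb v).1, ?_⟩
      intro j
      rw [(hb v).2]
      constructor
      · rintro ⟨hj0, hj⟩
        have hjk : j.toNat ≠ k := by
          intro h; rw [h] at hj; exact hvu (pvLookup_val hk hj).symm
        exact ⟨hj0, (pvLookup_set f hk d' _ _).mpr (Or.inr ⟨hjk, hj⟩)⟩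
      · rintro ⟨hj0, hj⟩
        rcases (pvLookup_set f hk d' _ _).mp hj with ⟨hjk, hv⟩ | ⟨hjk, hj'⟩
        · exact absurd hv.symm hvw
        · exact ⟨hj0, hj'⟩

-- a fresh deque appended at the end

lemma pvBucketInv_append (f : Int × Int → Int) (b : PySem.Dict Int (List Int))
    (ds : List (Int × Int)) (hb : pvBucketInv f b ds) (d' : Int × Int) :
    pvBucketInv f (b.modify (f d') [] (· ++ [(ds.length : Int)])) (ds ++ [d']) := by
  intro v
  rw [PySem.Dict.getD_modify]
  by_cases hv : v = f d'
  · subst hv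
    rw [if_pos rfl]
    constructor
    · refine List.Nodup.append (hb _).1 (by simp) ?_
      intro j hj hj'
      simp only [List.mem_singleton] at hj'
      subst hj'
      have h1 := ((hb _).2 _).1 hj
      have h2 := h1.2
      rw [Int.toNat_natCast] at h2
      have := pvLookup_lt h2
      omega
    · intro j
      rw [List.mem_append, (hb _).2, List.mem_singleton]
      constructor
      · rintro (⟨hj0, hj⟩ | rfl)
        · exact ⟨hj0, (pvLookup_append f d' _ _).mpr (Or.inr ⟨pvLookup_lt hj, hj⟩)⟩
        · exact ⟨by positivity, (pvLookup_append f d' _ _).mpr (Or.inl ⟨by simp, rfl⟩)⟩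
      · rintro ⟨hj0, hj⟩
        rcases (pvLookup_append f d' _ _).mp hj with ⟨hjk, -⟩ | ⟨-, hj'⟩
        · right; omega
        · exact Or.inl ⟨hj0, hj'⟩
  · rw [if_neg hv]
    refine ⟨(hb v).1, ?_⟩
    intro j
    rw [(hb v).2]
    constructor
    · rintro ⟨hj0, hj⟩
      exact ⟨hj0, (pvLookup_append f d' _ _).mpr (Or.inr ⟨pvLookup_lt hj, hj⟩)⟩
    · rintro ⟨hj0, hj⟩
      rcases (pvLookup_append f d' _ _).mp hj with ⟨hjk, hv'⟩ | ⟨-, hj'⟩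
      · exact absurd hv'.symm hv
      · exact ⟨hj0, hj'⟩


lemma pvStep_inv (i : Int) (ds : List (Int × Int)) st (h : pvInv ds st) :
    pvInv (pvStepA i ds) (pvStepB i st) := by
  obtain ⟨lo, hi, bl, bh⟩ := st
  obtain ⟨hlo, hhi, hbl, hbh⟩ := h
  simp only at hlo hhi hbl hbh
  have hcand : ∀ j : Int, j ∈ bl.getD (i + 1) [] ++ bh.getD (i - 1) [] ↔
      0 ≤ j ∧ ∃ hlt : j.toNat < ds.length, pvMatch i ds[j.toNat] := by
    intro j
    rw [List.mem_append, (hbl _).2, (hbh _).2]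
    constructor
    · rintro (⟨hj0, hj⟩ | ⟨hj0, hj⟩)
      · have hlt := pvLookup_lt hj
        have := pvLookup_val hlt hj
        exact ⟨hj0, hlt, Or.inl (by omega)⟩
      · have hlt := pvLookup_lt hj
        have := pvLookup_val hlt hj
        exact ⟨hj0, hlt, Or.inr (by omega)⟩
    · rintro ⟨hj0, hlt, h1 | h2⟩
      · left
        refine ⟨hj0, ?_⟩
        rw [pvLookup_self hlt]
        exact congrArg some (by omega)
      · right
        refine ⟨hj0, ?_⟩
        rw [pvLookup_self hlt]
        exact congrArg some (by omega)
  unfold pvStepA pvStepB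
  simp only
  cases hmin : PySem.List.min? (bl.getD (i + 1) [] ++ bh.getD (i - 1) []) (fun x => x) with
  | none =>
    have hnil := (PySem.List.min?_eq_none_iff _ _).mp hmin
    have hnone : pvTryPush i ds = none := by
      rw [pvTryPush_none_iff]
      intro d hd hm
      obtain ⟨k, hk, rfl⟩ := List.mem_iff_getElem.mp hd
      have : ((k : Int)) ∈ bl.getD (i + 1) [] ++ bh.getD (i - 1) [] := by
        rw [hcand]
        refine ⟨by positivity, by simpa using hk, by simpa using hm⟩
      rw [hnil] at this
      simp at this
    rw [hnone]
    have hlen : (lo.length : Int) = (ds.length : Int) := by rw [hlo]; simp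
    refine ⟨by simp [hlo], by simp [hhi], ?_, ?_⟩
    · have := pvBucketInv_append Prod.fst bl ds hbl (i, i)
      simpa [hlen] using this
    · have := pvBucketInv_append Prod.snd bh ds hbh (i, i)
      simpa [hlen] using this
  | some j =>
    obtain ⟨hj0, hlt, hm⟩ := (hcand j).mp (PySem.List.min?_mem hmin)
    have hjmin := PySem.List.min?_isMin hmin
    have hjk : j = ((j.toNat : Nat) : Int) := (Int.toNat_of_nonneg hj0).symm
    have hleast : ∀ l (hl : l < j.toNat), ¬ pvMatch i (ds[l]'(by omega)) := by
      intro l hl hml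
      have : ((l : Int)) ∈ bl.getD (i + 1) [] ++ bh.getD (i - 1) [] := by
        rw [hcand]
        exact ⟨by positivity, by simpa using (by omega : l < ds.length), by simpa using hml⟩
      have := hjmin _ this
      simp only at this
      omega
    rw [pvTryPush_some i ds j.toNat hlt hm hleast]
    dsimp only
    have hget : PySem.List.pyGetD lo j 0 = ds[j.toNat].1 := by
      rw [hlo, PySem.List.pyGetD_eq_getElem _ _ hj0 (by simp; omega)]
      simp
    by_cases hcond : PySem.List.pyGetD lo j 0 = i + 1
    · have hfst : Prod.fst ds[j.toNat] = i + 1 := by rw [hget] at hcond; exact hcond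
      have hA : i = ds[j.toNat].1 - 1 := by omega
      rw [if_pos hcond, if_pos hA]
      have hd1 : ds[j.toNat].1 - 1 = i := by omega
      rw [hd1]
      refine ⟨?_, ?_, ?_, ?_⟩
      · simp only
        rw [PySem.List.pySetD_of_nonneg _ _ hj0, hlo, List.map_set]
      · simp only
        rw [hhi, List.map_set]
        have hk' : j.toNat < (ds.map Prod.snd).length := by simpa using hlt
        rw [show (i, ds[j.toNat].2).2 = (ds.map Prod.snd)[j.toNat]'hk' from by simp,
          List.set_getElem_self]
      · have hne : Prod.fst ds[j.toNat] ≠ Prod.fst (i, ds[j.toNat].2) := by simp; omega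
        have := pvBucketInv_set_move Prod.fst bl ds hbl j.toNat hlt (i, ds[j.toNat].2) hne
        dsimp only at this
        rw [hfst, Int.toNat_of_nonneg hj0] at this
        exact this
      · exact pvBucketInv_set_same Prod.snd bh ds hbh j.toNat hlt (i, ds[j.toNat].2) rfl
    · have hA : ¬ i = ds[j.toNat].1 - 1 := by rw [hget] at hcond; omega
      have h2 : i = ds[j.toNat].2 + 1 := hm.resolve_left hA
      have hsnd : Prod.snd ds[j.toNat] = i - 1 := by omega
      rw [if_neg hcond, if_neg hA]
      have hd2 : ds[j.toNat].2 + 1 = i := by omega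
      rw [hd2]
      refine ⟨?_, ?_, ?_, ?_⟩
      · simp only
        rw [hlo, List.map_set]
        have hk' : j.toNat < (ds.map Prod.fst).length := by simpa using hlt
        rw [show (ds[j.toNat].1, i).1 = (ds.map Prod.fst)[j.toNat]'hk' from by simp,
          List.set_getElem_self]
      · simp only
        rw [PySem.List.pySetD_of_nonneg _ _ hj0, hhi, List.map_set]
      · exact pvBucketInv_set_same Prod.fst bl ds hbl j.toNat hlt (ds[j.toNat].1, i) rfl
      · have hne : Prod.snd ds[j.toNat] ≠ Prod.snd (ds[j.toNat].1, i) := by simp; omega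
        have := pvBucketInv_set_move Prod.snd bh ds hbh j.toNat hlt (ds[j.toNat].1, i) hne
        dsimp only at this
        rw [hsnd, Int.toNat_of_nonneg hj0] at this
        exact this


lemma pvInit_inv : pvInv [] ([], [], PySem.Dict.empty, PySem.Dict.empty) := by
  refine ⟨rfl, rfl, ?_, ?_⟩ <;>
  · intro v
    rw [PySem.Dict.getD_empty]
    simp


lemma pvFold_inv (ix : List Int) (ds : List (Int × Int)) st (h : pvInv ds st) :
    pvInv (ix.foldl (fun ds i => pvStepA i ds) ds) (ix.foldl (fun st i => pvStepB i st) st) := by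
  induction ix generalizing ds st with
  | nil => exact h
  | cons i t ih => exact ih _ _ (pvStep_inv i ds st h)


lemma pvRun (D : PySem.Dict Int Int) (data : List Int) :
    ((data.foldl (fun ds x =>
        let index := D.getD x 0
        match pvTryPush index ds with
        | some ds' => ds'
        | none => ds ++ [(index, index)]) []).length : Int)
    = ((data.foldl (fun st x => pvStepB (D.getD x 0) st)
        ([], [], PySem.Dict.empty, PySem.Dict.empty)).1.length : Int) := by
  have hinv := pvFold_inv (data.map (fun x => D.getD x 0)) [] _ pvInit_inv
  simp only [List.foldl_map] at hinv
  have h1 := hinv.1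
  show ((data.foldl (fun ds x => pvStepA (D.getD x 0) ds) []).length : Int) = _
  rw [h1]
  simp


lemma pvMain (data : List Int) : minDeques data = minDeques_alt data := by
  have hd : (PySem.List.enumerate (PySem.List.sorted data (fun x => x) false) 0).foldl
        (fun m p => m.insert p.2 p.1) PySem.Dict.empty
      = (PySem.List.pyRange 0 ((PySem.List.sorted data (fun x => x) false).length : Int) 1).foldl
        (fun m i => m.insert (PySem.List.pyGetD (PySem.List.sorted data (fun x => x) false) i 0) i)
        PySem.Dict.empty := by
    rw [PySem.List.enumerate_eq_map_pyRange (PySem.List.sorted data (fun x => x) false) 0,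
      List.foldl_map]
    rfl
  unfold minDeques minDeques_alt
  rw [hd]
  exact pvRun _ data


-- ===== VERDICT (by name: the statement is the Claim_ definition above) =====
theorem minDeques_spec : Claim_equal_minDeques := by
  intro data _
  exact pvMain data
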